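-- pv_equiv track=rewrite | github.com/antoni-jamiolkowski/aoc-2023 | solutions/day03/part_1/script.py | find_numbers_candidates
-- ===== SOURCE A (Python) =====
-- from typing import NamedTuple, TypeAlias
--
-- Coordinate: TypeAlias = tuple[int, ...]
--
-- class NumbersCandidates(NamedTuple):
--     numbers: list[int]
--     numbers_coords: list[Coordinate]
--
-- def find_numbers_candidates(line: str) -> NumbersCandidates:
--     numbers: list[int] = []
--     numbers_coords: list[Coordinate] = []
--
--     number_candidate: str = ""
--     candidate_coord: list[int] = []
--     for char_id, char in enumerate(line):
--         if char.isdigit():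
--             number_candidate += char
--             candidate_coord.append(char_id)
--         elif number_candidate:
--             numbers.append(int(number_candidate))
--             numbers_coords.append(tuple(candidate_coord))
--             number_candidate = ""
--             candidate_coord = []
--
--     if number_candidate:
--         numbers.append(int(number_candidate))
--         numbers_coords.append(tuple(candidate_coord))
--
--     return NumbersCandidates(numbers=numbers, numbers_coords=numbers_coords)
-- ===== SOURCE B (Python) =====
-- from typing import NamedTuple, TypeAlias
-- from itertools import groupby
--
-- Coordinate: TypeAlias = tuple[int, ...]
--
-- class NumbersCandidates(NamedTuple):
--     numbers: list[int]
--     numbers_coords: list[Coordinate]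
--
-- def find_numbers_candidates(line: str) -> NumbersCandidates:
--     numbers: list[int] = []
--     numbers_coords: list[Coordinate] = []
--     for is_digit, group in groupby(enumerate(line), key=lambda t: t[1].isdigit()):
--         if is_digit:
--             pairs = list(group)
--             numbers.append(int("".join(ch for _, ch in pairs)))
--             numbers_coords.append(tuple(i for i, _ in pairs))
--     return NumbersCandidates(numbers=numbers, numbers_coords=numbers_coords)
-- ===== Notes on version B (the rewrite author's own statement) =====
-- stated objective: idiomatic
-- what changed: Replaced the manual state-machine loop (running string, coordinate accumulator, explicit flush at separators and at end-of-line) by a single itertools.groupby pass over enumerate(line) keyed on isdigit, consuming each digit run as one group.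
import Mathlib
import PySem

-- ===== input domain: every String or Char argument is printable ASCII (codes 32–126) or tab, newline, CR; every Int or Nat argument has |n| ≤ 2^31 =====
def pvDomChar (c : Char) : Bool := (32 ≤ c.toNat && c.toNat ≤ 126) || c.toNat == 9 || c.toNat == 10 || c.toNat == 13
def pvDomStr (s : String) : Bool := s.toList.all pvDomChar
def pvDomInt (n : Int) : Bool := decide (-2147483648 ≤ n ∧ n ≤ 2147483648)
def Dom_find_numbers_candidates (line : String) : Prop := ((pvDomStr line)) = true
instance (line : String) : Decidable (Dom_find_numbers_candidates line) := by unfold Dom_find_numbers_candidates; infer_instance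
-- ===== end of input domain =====

-- B replaces A's manual flush/state-machine loop by a groupby-style pass that consumes
-- each maximal digit run at once (objective: idiomatic).


-- ===== PORT A =====
-- A's for-loop: state is (numbers, numbers_coords, number_candidate, candidate_coord).
-- int(number_candidate) is ported as (PySem.Int.ofChars? _).getD 0: on every reachable
-- flush the candidate is a nonempty ASCII digit string, so ofChars? is `some` there.
def finalizeA : List Int × List (List Int) × List Char × List Int → List Int × List (List Int)
  | (ns, cs, cand, cc) =>
    if !cand.isEmpty then (ns ++ [(PySem.Int.ofChars? cand).getD 0], cs ++ [cc])
    else (ns, cs)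

def findA_loop : List (Int × Char) → List Int → List (List Int) → List Char → List Int →
    List Int × List (List Int) × List Char × List Int
  | [], ns, cs, cand, cc => (ns, cs, cand, cc)
  | (i, c) :: rest, ns, cs, cand, cc =>
    if PySem.Chars.isdigit c then
      findA_loop rest ns cs (cand ++ [c]) (cc ++ [i])
    else if !cand.isEmpty then
      findA_loop rest (ns ++ [(PySem.Int.ofChars? cand).getD 0]) (cs ++ [cc]) [] []
    else
      findA_loop rest ns cs cand cc

def find_numbers_candidates (line : String) : List Int × List (List Int) :=
  finalizeA (findA_loop (PySem.List.enumerate line.toList 0) [] [] [] [])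

-- ===== PORT B =====
-- Source B's groupby pass: skip a non-digit entry; on a digit entry take the whole
-- maximal digit run as one group and recurse on what follows it.
def findB_go : List (Int × Char) → List Int × List (List Int)
  | [] => ([], [])
  | (i, c) :: rest =>
    if PySem.Chars.isdigit c then
      let grp := (i, c) :: rest.takeWhile (fun p => PySem.Chars.isdigit p.2)
      let tl := findB_go (rest.dropWhile (fun p => PySem.Chars.isdigit p.2))
      ((PySem.Int.ofChars? (grp.map (·.2))).getD 0 :: tl.1, grp.map (·.1) :: tl.2)
    else
      findB_go rest
  termination_by l => l.length
  decreasing_by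
    · simpa using Nat.lt_succ_of_le (List.length_dropWhile_le _ _)
    · simp

def find_numbers_candidates_alt (line : String) : List Int × List (List Int) :=
  findB_go (PySem.List.enumerate line.toList 0)

-- ===== PRECONDITION & SPEC =====
def Spec_find_numbers_candidates (line : String) (out : List Int × List (List Int)) : Prop := out = find_numbers_candidates_alt line
instance (line : String) (out : List Int × List (List Int)) : Decidable (Spec_find_numbers_candidates line out) := by unfold Spec_find_numbers_candidates; infer_instance

-- ===== CLAIM (what is proved, stated in full; the proofs are below) =====
def Claim_equal_find_numbers_candidates : Prop := ∀ (line : String), Dom_find_numbers_candidates line → Spec_find_numbers_candidates line (find_numbers_candidates line)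

-- ===== LEMMAS AND PROOFS =====

-- A's loop-plus-final-flush, with empty output accumulators, as one recursion.
def gRun : List Char → List Int → List (Int × Char) → List Int × List (List Int)
  | cand, cc, [] =>
    if !cand.isEmpty then ([(PySem.Int.ofChars? cand).getD 0], [cc]) else ([], [])
  | cand, cc, (i, c) :: rest =>
    if PySem.Chars.isdigit c then gRun (cand ++ [c]) (cc ++ [i]) rest
    else if !cand.isEmpty then
      let tl := gRun [] [] rest
      ((PySem.Int.ofChars? cand).getD 0 :: tl.1, cc :: tl.2)
    else gRun cand cc rest

lemma findA_loop_eq_gRun (l : List (Int × Char)) :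
    ∀ (ns : List Int) (cs : List (List Int)) (cand : List Char) (cc : List Int),
    finalizeA (findA_loop l ns cs cand cc)
    = (ns ++ (gRun cand cc l).1, cs ++ (gRun cand cc l).2) := by
  induction l with
  | nil =>
    intro ns cs cand cc
    simp only [findA_loop, gRun, finalizeA]
    by_cases h : cand.isEmpty <;> simp [h]
  | cons p rest ih =>
    intro ns cs cand cc
    obtain ⟨i, c⟩ := p
    by_cases hd : PySem.Chars.isdigit c
    · rw [findA_loop, if_pos hd, ih, gRun, if_pos hd]
    · by_cases he : cand.isEmpty
      · rw [findA_loop, if_neg hd, if_neg (by simp [he]), ih, gRun, if_neg hd,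
          if_neg (by simp [he])]
      · rw [findA_loop, if_neg hd, if_pos (by simp [he]), ih, gRun, if_neg hd,
          if_pos (by simp [he])]
        simp

lemma gRun_nonempty (l : List (Int × Char)) :
    ∀ (cand : List Char) (cc : List Int), cand ≠ [] →
    gRun cand cc l =
      ((PySem.Int.ofChars? (cand ++ (l.takeWhile (fun p => PySem.Chars.isdigit p.2)).map (·.2))).getD 0
          :: (gRun [] [] (l.dropWhile (fun p => PySem.Chars.isdigit p.2))).1,
        (cc ++ (l.takeWhile (fun p => PySem.Chars.isdigit p.2)).map (·.1))
          :: (gRun [] [] (l.dropWhile (fun p => PySem.Chars.isdigit p.2))).2) := by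
  induction l with
  | nil =>
    intro cand cc h
    simp [gRun, h]
  | cons p rest ih =>
    intro cand cc h
    obtain ⟨i, c⟩ := p
    by_cases hd : PySem.Chars.isdigit c
    · rw [gRun, if_pos hd, ih _ _ (by simp)]
      simp [hd]
    · rw [gRun, if_neg hd, if_pos (by simp [h])]
      have hdw : List.dropWhile (fun p => PySem.Chars.isdigit p.2) ((i, c) :: rest)
          = (i, c) :: rest := by simp [hd]
      have hg : gRun [] [] ((i, c) :: rest) = gRun [] [] rest := by
        rw [gRun, if_neg hd, if_neg (by simp)]
      simp [hdw, hg, hd]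

lemma gRun_empty_eq_findB_go : ∀ (n : Nat) (l : List (Int × Char)), l.length ≤ n →
    gRun [] [] l = findB_go l := by
  intro n
  induction n with
  | zero =>
    intro l hl
    rw [List.length_eq_zero_iff.mp (Nat.le_zero.mp hl)]
    simp [gRun, findB_go]
  | succ n ih =>
    intro l hl
    match l with
    | [] => simp [gRun, findB_go]
    | (i, c) :: rest =>
      by_cases hd : PySem.Chars.isdigit c
      · have h1 : gRun [] [] ((i, c) :: rest) = gRun [c] [i] rest := by
          rw [gRun, if_pos hd]; rfl
        rw [h1, gRun_nonempty rest [c] [i] (by simp)]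
        have hlen : (rest.dropWhile (fun p => PySem.Chars.isdigit p.2)).length ≤ n :=
          Nat.le_trans (List.length_dropWhile_le _ _) (by simpa using Nat.le_of_succ_le_succ hl)
        rw [ih _ hlen, findB_go, if_pos hd]
        simp
      · rw [gRun, if_neg hd, if_neg (by simp), findB_go, if_neg hd]
        exact ih rest (by simpa using Nat.le_of_succ_le_succ hl)

-- ===== VERDICT (by name: the statement is the Claim_ definition above) =====
theorem find_numbers_candidates_spec : Claim_equal_find_numbers_candidates := by
  intro line _
  show _ = _
  unfold find_numbers_candidates find_numbers_candidates_alt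
  rw [findA_loop_eq_gRun, gRun_empty_eq_findB_go _ _ (Nat.le_refl _)]
  simp
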